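-- pv_equiv track=rewrite | github.com/ellieko/algorithms | codingtest/test.py | comparatorValue_v1
-- ===== SOURCE A (Python) =====
-- def comparatorValue_v1(a, b, d):
--     count = 0
--     for i in a:
--         counted = True
--         for j in b:
--             if abs(i-j) <= d:
--                 counted = False
--                 break
--         if counted:
--             count +=1
--     return count
-- ===== SOURCE B (Python) =====
-- def comparatorValue_v1(a, b, d):
--     # Sort b once, then for each i binary-search for a neighbor in [i-d, i+d].
--     sb = sorted(b)
--     n = len(sb)
--     count = 0
--     for i in a:
--         x = i - d
--         lo, hi = 0, n
--         while lo < hi: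
--             mid = (lo + hi) // 2
--             if sb[mid] < x:
--                 lo = mid + 1
--             else:
--                 hi = mid
--         if not (lo < n and sb[lo] <= i + d):
--             count += 1
--     return count
-- ===== Notes on version B (the rewrite author's own statement) =====
-- stated objective: faster
-- what changed: Instead of scanning all of b for every element of a, B sorts b once and binary-searches each i for a neighbor in [i-d, i+d].
import Mathlib
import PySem

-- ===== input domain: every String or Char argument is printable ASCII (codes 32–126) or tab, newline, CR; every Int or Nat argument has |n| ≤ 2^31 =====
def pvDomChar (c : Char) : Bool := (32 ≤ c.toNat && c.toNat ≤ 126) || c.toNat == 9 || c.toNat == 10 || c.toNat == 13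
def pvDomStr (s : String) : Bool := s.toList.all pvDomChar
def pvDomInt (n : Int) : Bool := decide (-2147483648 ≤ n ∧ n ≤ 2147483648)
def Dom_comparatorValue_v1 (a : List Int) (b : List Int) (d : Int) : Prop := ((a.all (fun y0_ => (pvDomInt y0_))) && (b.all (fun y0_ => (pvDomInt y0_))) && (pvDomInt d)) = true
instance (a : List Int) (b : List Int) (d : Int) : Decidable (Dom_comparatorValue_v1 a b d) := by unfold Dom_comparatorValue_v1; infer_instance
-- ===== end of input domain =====

-- B sorts b once and binary-searches each i for a neighbor in [i-d, i+d] instead of scanning all of b per element of a.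

-- ===== PORT A =====
-- inner 'for j in b' loop with its early break: returns the final value of `counted`
def pvInnerA (b : List Int) (i d : Int) : Bool :=
  match b with
  | [] => true
  | j :: rest => if |i - j| ≤ d then false else pvInnerA rest i d

def comparatorValue_v1 (a : List Int) (b : List Int) (d : Int) : Int :=
  a.foldl (fun count i => if pvInnerA b i d then count + 1 else count) 0

-- ===== PORT B =====
-- the hand-written `while lo < hi` binary search of Source B, step for step
def pvBsearch (sb : List Int) (x : Int) (lo hi : Nat) : Nat :=
  if lo < hi then
    let mid := (lo + hi) / 2
    if sb.getD mid 0 < x then pvBsearch sb x (mid + 1) hi else pvBsearch sb x lo mid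
  else lo
termination_by hi - lo
decreasing_by all_goals omega

def comparatorValue_v1_alt (a : List Int) (b : List Int) (d : Int) : Int :=
  let sb := PySem.List.sorted b (fun x => x) false
  let n := sb.length
  a.foldl (fun count i =>
    let lo := pvBsearch sb (i - d) 0 n
    if !(decide (lo < n) && decide (sb.getD lo 0 ≤ i + d)) then count + 1 else count) 0

-- ===== PRECONDITION & SPEC =====
def Spec_comparatorValue_v1 (a : List Int) (b : List Int) (d : Int) (out : Int) : Prop := out = comparatorValue_v1_alt a b d
instance (a : List Int) (b : List Int) (d : Int) (out : Int) : Decidable (Spec_comparatorValue_v1 a b d out) := by unfold Spec_comparatorValue_v1; infer_instance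

-- ===== CLAIM (what is proved, stated in full; the proofs are below) =====
def Claim_equal_comparatorValue_v1 : Prop := ∀ (a : List Int) (b : List Int) (d : Int), Dom_comparatorValue_v1 a b d → Spec_comparatorValue_v1 a b d (comparatorValue_v1 a b d)

-- ===== LEMMAS AND PROOFS =====

-- A's inner loop returns true iff no element of b is within distance d of i
theorem pvInnerA_iff (b : List Int) (i d : Int) :
    pvInnerA b i d = true ↔ ∀ j ∈ b, ¬ (|i - j| ≤ d) := by
  induction b with
  | nil => simp [pvInnerA]
  | cons j rest ih =>
      by_cases h : |i - j| ≤ d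
      · simp [pvInnerA, h]
      · simp [pvInnerA, h, ih]
        exact fun _ => not_le.mp h

-- invariant-carrying correctness of the binary search loop
theorem pvBsearch_spec (sb : List Int) (x : Int) (lo hi : Nat)
    (hsort : sb.Pairwise (· ≤ ·))
    (hhi : hi ≤ sb.length) (hle : lo ≤ hi)
    (hlow : ∀ k, k < lo → ∀ (hk : k < sb.length), sb[k] < x)
    (hhigh : ∀ k, hi ≤ k → ∀ (hk : k < sb.length), x ≤ sb[k]) :
    pvBsearch sb x lo hi ≤ sb.length ∧
      (∀ k, k < pvBsearch sb x lo hi → ∀ (hk : k < sb.length), sb[k] < x) ∧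
      (∀ k, pvBsearch sb x lo hi ≤ k → ∀ (hk : k < sb.length), x ≤ sb[k]) := by
  fun_induction pvBsearch sb x lo hi with
  | case1 lo hi h mid hmid ih =>
      -- sb[mid] < x : advance lo past mid
      refine ih ?_ ?_ ?_ hhigh
      · exact hhi
      · omega
      · intro k hk hklen
        have hm : mid < sb.length := by omega
        have hkm : k ≤ mid := by omega
        have hmid' : sb[mid] < x := by
          have : sb.getD mid 0 = sb[mid] := List.getD_eq_getElem sb 0 hm
          omega
        rcases Nat.lt_or_ge k mid with hlt | hge
        · have := (List.pairwise_iff_getElem.mp hsort) k mid hklen hm hlt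
          exact lt_of_le_of_lt this hmid'
        · have : k = mid := by omega
          subst this; exact hmid'
  | case2 lo hi h mid hmid ih =>
      -- x ≤ sb[mid] : shrink hi to mid
      refine ih ?_ ?_ hlow ?_
      · omega
      · omega
      · intro k hk hklen
        have hm : mid < sb.length := by omega
        have hx : x ≤ sb[mid] := by
          have : sb.getD mid 0 = sb[mid] := List.getD_eq_getElem sb 0 hm
          omega
        rcases Nat.lt_or_ge mid k with hlt | hge
        · have := (List.pairwise_iff_getElem.mp hsort) mid k hm hklen hlt
          exact le_trans hx this
        · have : k = mid := by omega
          subst this; exact hx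
  | case3 lo hi h =>
      refine ⟨by omega, ?_, ?_⟩
      · intro k hk hklen; exact hlow k (by omega) hklen
      · intro k hk hklen; exact hhigh k (by omega) hklen

-- the found position witnesses a neighbor iff one exists in the sorted list
theorem pvBsearch_found_iff (sb : List Int) (i d : Int)
    (hsort : sb.Pairwise (· ≤ ·)) :
    (let r := pvBsearch sb (i - d) 0 sb.length
     r < sb.length ∧ sb.getD r 0 ≤ i + d) ↔ ∃ j ∈ sb, |i - j| ≤ d := by
  obtain ⟨hrle, hbelow, habove⟩ :=
    pvBsearch_spec sb (i - d) 0 sb.length hsort le_rfl (Nat.zero_le _)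
      (by omega) (fun k hk hklen => absurd hklen (by omega))
  set r := pvBsearch sb (i - d) 0 sb.length with hr
  constructor
  · rintro ⟨hrn, hub⟩
    refine ⟨sb[r], List.getElem_mem hrn, ?_⟩
    have h1 : i - d ≤ sb[r] := habove r le_rfl hrn
    have h2 : sb.getD r 0 = sb[r] := List.getD_eq_getElem sb 0 hrn
    rw [abs_le]; omega
  · rintro ⟨j, hj, hjd⟩
    obtain ⟨k, hk, hkj⟩ := List.getElem_of_mem hj
    have hjr : i - d ≤ j ∧ j ≤ i + d := by rw [abs_le] at hjd; omega
    have hrk : r ≤ k := by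
      by_contra hc
      have := hbelow k (by omega) hk
      omega
    have hrn : r < sb.length := by omega
    refine ⟨hrn, ?_⟩
    have hle2 : sb[r] ≤ sb[k] := by
      rcases Nat.lt_or_ge r k with hlt | hge
      · exact (List.pairwise_iff_getElem.mp hsort) r k hrn hk hlt
      · have : r = k := by omega
        subst this; exact le_rfl
    have h2 : sb.getD r 0 = sb[r] := List.getD_eq_getElem sb 0 hrn
    omega

-- the two per-element tests agree, hence the two folds agree
theorem pv_body_eq (b : List Int) (i d : Int) :
    pvInnerA b i d =
      (let sb := PySem.List.sorted b (fun x => x) false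
       let lo := pvBsearch sb (i - d) 0 sb.length
       !(decide (lo < sb.length) && decide (sb.getD lo 0 ≤ i + d))) := by
  set sb := PySem.List.sorted b (fun x => x) false with hsb
  have hsort : sb.Pairwise (· ≤ ·) := PySem.List.sorted_pairwise b (fun x => x)
  have hmem : ∀ j, j ∈ sb ↔ j ∈ b := fun j =>
    (PySem.List.sorted_perm b (fun x => x) false).mem_iff
  have hiff := pvBsearch_found_iff sb i d hsort
  simp only at hiff
  by_cases h : pvInnerA b i d = true
  · rw [h]
    have hno := (pvInnerA_iff b i d).mp h
    have : ¬ (pvBsearch sb (i - d) 0 sb.length < sb.length ∧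
        sb.getD (pvBsearch sb (i - d) 0 sb.length) 0 ≤ i + d) := by
      intro hc
      obtain ⟨j, hj, hjd⟩ := hiff.mp hc
      exact hno j ((hmem j).mp hj) hjd
    by_cases hlt : pvBsearch sb (i - d) 0 sb.length < sb.length
    · have h2 : ¬ sb.getD (pvBsearch sb (i - d) 0 sb.length) 0 ≤ i + d := fun hc =>
        this ⟨hlt, hc⟩
      simp [hlt]
      have h2' : ¬ sb[pvBsearch sb (i - d) 0 sb.length] ≤ i + d := by
        rw [← List.getD_eq_getElem sb 0 hlt]; exact h2
      exact not_le.mp h2'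
    · simp [hlt]
  · have hB : pvInnerA b i d = false := by
      cases hv : pvInnerA b i d
      · rfl
      · exact absurd hv h
    rw [hB]
    rw [pvInnerA_iff] at h
    rw [not_forall] at h; simp only [not_forall, exists_prop, not_lt, not_le] at h
    obtain ⟨j, hj, hjd⟩ := h
    have hc := hiff.mpr ⟨j, (hmem j).mpr hj, hjd⟩
    have hgd := hc.2
    rw [List.getD_eq_getElem sb 0 hc.1] at hgd
    simp [hc.1, hgd]

-- ===== VERDICT (by name: the statement is the Claim_ definition above) =====
theorem comparatorValue_v1_spec : Claim_equal_comparatorValue_v1 := by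
  intro a b d _
  unfold Spec_comparatorValue_v1
  simp only [comparatorValue_v1, comparatorValue_v1_alt]
  congr 1
  funext count i
  rw [pv_body_eq b i d]
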